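-- pv_equiv track=rewrite | github.com/ALVAN-5/A5-Auth-Server | a5_auth_server/ip_auth/validators/validate_token.py | validateToken
-- ===== SOURCE A (Python) =====
-- def validateToken(token: str):
--     SPECIAL_CHARS = "!\"#$%&'()*+,-./:;<=>?@[\\]^_`{|}~"
--     stripped_token = token
--     _ = [(stripped_token := stripped_token.replace(c, '')) for c in SPECIAL_CHARS]
--     if len(token) < 6 or len(token) > 32 or len(stripped_token) < 0 or len(token) == len(stripped_token):
--         return False
--     if not stripped_token.isalnum():
--         return False
--
--     return True
-- ===== SOURCE B (Python) =====
-- def validateToken(token: str):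
--     SPECIAL = set("!\"#$%&'()*+,-./:;<=>?@[\\]^_`{|}~")
--     stripped = ''.join(c for c in token if c not in SPECIAL)
--     if len(token) < 6 or len(token) > 32 or len(token) == len(stripped) or not stripped.isalnum():
--         return False
--     return True
-- ===== Notes on version B (the rewrite author's own statement) =====
-- stated objective: simpler
-- what changed: Replaces the 32 full-string .replace() passes (one per punctuation character, via a walrus list comprehension) with a single filter pass over the token using a set of special characters; the dead len<0 check is dropped.
import Mathlib
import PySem

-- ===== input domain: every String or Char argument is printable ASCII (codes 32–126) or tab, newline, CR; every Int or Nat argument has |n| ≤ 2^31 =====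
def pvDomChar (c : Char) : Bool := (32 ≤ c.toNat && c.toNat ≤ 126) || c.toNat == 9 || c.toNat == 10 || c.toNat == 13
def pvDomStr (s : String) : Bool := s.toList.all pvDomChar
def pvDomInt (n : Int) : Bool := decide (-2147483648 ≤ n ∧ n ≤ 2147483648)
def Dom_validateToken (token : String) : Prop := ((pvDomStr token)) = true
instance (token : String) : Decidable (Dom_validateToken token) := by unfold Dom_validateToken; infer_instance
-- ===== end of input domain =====

-- B replaces A's 32 sequential .replace() passes with one filter pass over the token using a set of special characters; same outputs, simpler.


-- ===== PORT A =====
def validateToken (token : String) : Bool :=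
  let SPECIAL_CHARS : String := "!\"#$%&'()*+,-./:;<=>?@[\\]^_`{|}~"
  -- the walrus list comprehension: successively replace each special char by ""
  let stripped_token :=
    SPECIAL_CHARS.toList.foldl (fun s c => PySem.Str.replace s (String.ofList [c]) "") token
  if PySem.Str.len token < 6 || 32 < PySem.Str.len token
      || decide ((PySem.Str.len stripped_token : Int) < 0)
      || PySem.Str.len token == PySem.Str.len stripped_token then false
  else if !(PySem.Str.strIsalnum stripped_token) then false
  else true

-- ===== PORT B =====
def validateToken_alt (token : String) : Bool :=
  let special : PySem.Set Char := PySem.Set.ofList "!\"#$%&'()*+,-./:;<=>?@[\\]^_`{|}~".toList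
  -- ''.join(c for c in token if c not in SPECIAL): one filter pass over the characters
  let stripped : List Char := token.toList.filter (fun c => !(PySem.Set.contains special c))
  if PySem.Chars.len token.toList < 6 || 32 < PySem.Chars.len token.toList
      || PySem.Chars.len token.toList == PySem.Chars.len stripped
      || !(PySem.Chars.strIsalnum stripped) then false
  else true

-- ===== PRECONDITION & SPEC =====
def Spec_validateToken (token : String) (out : Bool) : Prop := out = validateToken_alt token
instance (token : String) (out : Bool) : Decidable (Spec_validateToken token out) := by unfold Spec_validateToken; infer_instance

-- ===== CLAIM (what is proved, stated in full; the proofs are below) =====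
def Claim_equal_validateToken : Prop := ∀ (token : String), Dom_validateToken token → Spec_validateToken token (validateToken token)

-- ===== LEMMAS AND PROOFS =====

-- one .replace(c, '') pass removes exactly the occurrences of c (the fuelled go loop, single-char pattern)
theorem replace_go_single (c : Char) (l : List Char) : ∀ (fuel : Nat) (acc : List Char),
    l.length ≤ fuel →
    PySem.Chars.replace.go [c] [] fuel l acc = acc.reverse ++ l.filter (fun x => x != c) := by
  induction l with
  | nil => intro fuel acc _; cases fuel <;> simp [PySem.Chars.replace.go]
  | cons a t ih =>
    intro fuel acc h
    cases fuel with
    | zero => simp at h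
    | succ n =>
      simp only [PySem.Chars.replace.go, List.isPrefixOf]
      by_cases hc : a = c
      · subst hc
        simp only [BEq.rfl, if_pos, Bool.and_true, List.length_cons, List.length_nil,
          Nat.zero_add, List.drop_succ_cons, List.drop_zero, List.reverse_nil, List.nil_append]
        rw [ih n acc (by simpa using h)]
        simp
      · have hbc : (c == a) = false := by
          simp only [beq_eq_false_iff_ne]; exact fun h' => hc h'.symm
        simp only [hbc, Bool.false_and, Bool.false_eq_true, if_neg, not_false_iff]
        rw [ih n (a :: acc) (by simpa using h)]
        simp [hc]

theorem replace_single (c : Char) (s : List Char) :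
    PySem.Chars.replace s [c] [] = s.filter (fun x => x != c) := by
  rw [PySem.Chars.replace]
  simp only [List.isEmpty_cons, if_neg, Bool.false_eq_true, not_false_iff]
  rw [replace_go_single c s s.length [] le_rfl]
  simp

-- a cascade of single-char filters is one filter against list membership
theorem foldl_filter (cs : List Char) : ∀ (t : List Char),
    cs.foldl (fun s c => s.filter (fun x => x != c)) t
      = t.filter (fun x => !cs.contains x) := by
  induction cs with
  | nil => intro t; simp
  | cons c cs ih =>
    intro t
    rw [List.foldl_cons, ih, List.filter_filter]
    apply List.filter_congr
    intro x _
    by_cases hx : x = c <;> simp [hx]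

-- A's string-level replace cascade, moved to the character-list level
theorem str_fold_toList (cs : List Char) : ∀ (t : String),
    (cs.foldl (fun s c => PySem.Str.replace s (String.ofList [c]) "") t).toList
      = cs.foldl (fun s c => PySem.Chars.replace s [c] []) t.toList := by
  induction cs with
  | nil => intro t; simp
  | cons c cs ih =>
    intro t
    rw [List.foldl_cons, List.foldl_cons, ih, PySem.Str.toList_replace]
    simp

theorem stripped_eq (t : String) :
    (("!\"#$%&'()*+,-./:;<=>?@[\\]^_`{|}~".toList).foldl
        (fun s c => PySem.Str.replace s (String.ofList [c]) "") t).toList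
      = t.toList.filter
          (fun c => !(PySem.Set.contains (PySem.Set.ofList "!\"#$%&'()*+,-./:;<=>?@[\\]^_`{|}~".toList) c)) := by
  rw [str_fold_toList]
  have hfun : (fun (s : List Char) (c : Char) => PySem.Chars.replace s [c] [])
      = fun s c => s.filter (fun x => x != c) := by
    funext s c; exact replace_single c s
  rw [hfun, foldl_filter]
  apply List.filter_congr
  intro x _
  simp [PySem.Set.mem_ofList]

-- ===== VERDICT (by name: the statement is the Claim_ definition above) =====
theorem validateToken_spec : Claim_equal_validateToken := by
  intro token _
  unfold Spec_validateToken validateToken validateToken_alt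
  have hz : ∀ n : Nat, decide ((n : Int) < 0) = false := fun n => by simp
  simp only [PySem.Str.len_eq, PySem.Str.strIsalnum_eq, stripped_eq, PySem.Chars.len_eq, hz,
    Bool.or_false]
  generalize token.toList.filter _ = st
  have shape : ∀ (a c : Bool),
      (if a = true then false else if (!c) = true then false else true)
        = (if (a || !c) = true then false else true) := by
    intro a c; cases a <;> cases c <;> rfl
  exact shape _ _
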